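-- pv_equiv track=rewrite | github.com/ccvadmin/ccv | ccv_add_filter_currency/models/account_report.py | _identify_currency_indices
-- ===== SOURCE A (Python) =====
-- NOT_APPLY_KEYS = ['foreign_balance']
--
-- GET_LAST_VALUE_KEYS = ['balance']
--
-- GET_LAST_VALUE_NT_KEYS = ['foreign_balance']
--
-- def _identify_currency_indices(options):
--     monetary_index, last_val_index, last_val_nt_index = [], [], []
--     index_update, index_update1, index_update2 = [], [], []
--     for count, column_option in enumerate(options["columns"]):
--         if column_option.get("figure_type") == "monetary":
--             monetary_index.append(count)
--             if column_option.get("expression_label") in GET_LAST_VALUE_KEYS: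
--                 last_val_index.append(count)
--             elif column_option.get("expression_label") in GET_LAST_VALUE_NT_KEYS:
--                 last_val_nt_index.append(count)
--             if column_option.get("expression_label") in ['amount_currency']:
--                 index_update2.append(count)
--             elif column_option.get("expression_label") not in NOT_APPLY_KEYS:
--                 index_update.append(count)
--             elif column_option.get("expression_label") in NOT_APPLY_KEYS:
--                 index_update1.append(count)
--     return monetary_index, last_val_index, last_val_nt_index, index_update, index_update1, index_update2
-- ===== SOURCE B (Python) =====
-- NOT_APPLY_KEYS = ['foreign_balance']
--
-- GET_LAST_VALUE_KEYS = ['balance']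
--
-- GET_LAST_VALUE_NT_KEYS = ['foreign_balance']
--
-- def _identify_currency_indices(options):
--     monetary = [(i, c.get("expression_label"))
--                 for i, c in enumerate(options["columns"])
--                 if c.get("figure_type") == "monetary"]
--     monetary_index = [i for i, _ in monetary]
--     last_val_index = [i for i, lbl in monetary if lbl in GET_LAST_VALUE_KEYS]
--     last_val_nt_index = [i for i, lbl in monetary if lbl in GET_LAST_VALUE_NT_KEYS]
--     index_update2 = [i for i, lbl in monetary if lbl == "amount_currency"]
--     index_update = [i for i, lbl in monetary
--                     if lbl != "amount_currency" and lbl not in NOT_APPLY_KEYS]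
--     index_update1 = [i for i, lbl in monetary
--                      if lbl != "amount_currency" and lbl in NOT_APPLY_KEYS]
--     return monetary_index, last_val_index, last_val_nt_index, index_update, index_update1, index_update2
-- ===== Notes on version B (the rewrite author's own statement) =====
-- stated objective: idiomatic
-- what changed: Replaces the single nested-branch accumulator loop with an index-then-filter decomposition: one comprehension collects the monetary (index, label) pairs, then each of the six result lists is an independent filter over that list.
import Mathlib
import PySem

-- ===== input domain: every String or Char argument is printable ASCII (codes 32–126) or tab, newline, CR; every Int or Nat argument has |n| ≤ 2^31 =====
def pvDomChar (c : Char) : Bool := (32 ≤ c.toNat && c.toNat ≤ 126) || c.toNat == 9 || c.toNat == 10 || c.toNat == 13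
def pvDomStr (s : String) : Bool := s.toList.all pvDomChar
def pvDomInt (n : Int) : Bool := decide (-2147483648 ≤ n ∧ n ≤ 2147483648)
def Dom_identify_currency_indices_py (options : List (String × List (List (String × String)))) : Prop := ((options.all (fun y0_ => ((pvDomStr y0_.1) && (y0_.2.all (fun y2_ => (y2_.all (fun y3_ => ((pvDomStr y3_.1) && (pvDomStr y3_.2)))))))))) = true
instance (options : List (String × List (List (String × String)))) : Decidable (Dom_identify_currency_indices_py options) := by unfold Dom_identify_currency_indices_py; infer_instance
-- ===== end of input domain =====

-- B is an idiomatic index-then-filter decomposition of A's single nested-branch loop; same cost, different structure.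
-- Equivalence is about the RETURN value (neither version mutates its argument).

-- ===== PORT A =====
-- one loop iteration of A: the six accumulators, the nested branches in A's order
def pvStepA (s : List Int × List Int × List Int × List Int × List Int × List Int)
    (p : Int × List (String × String)) :
    List Int × List Int × List Int × List Int × List Int × List Int :=
  let (mi, lv, lvnt, iu, iu1, iu2) := s
  if (PySem.Dict.mk p.2).get? "figure_type" = some "monetary" then
    let mi := mi ++ [p.1]
    let el := (PySem.Dict.mk p.2).get? "expression_label"
    let (lv, lvnt) :=
      if el = some "balance" then (lv ++ [p.1], lvnt)
      else if el = some "foreign_balance" then (lv, lvnt ++ [p.1])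
      else (lv, lvnt)
    let (iu, iu1, iu2) :=
      if el = some "amount_currency" then (iu, iu1, iu2 ++ [p.1])
      else if ¬ el = some "foreign_balance" then (iu ++ [p.1], iu1, iu2)
      else if el = some "foreign_balance" then (iu, iu1 ++ [p.1], iu2)
      else (iu, iu1, iu2)
    (mi, lv, lvnt, iu, iu1, iu2)
  else s

def identify_currency_indices_py (options : List (String × List (List (String × String)))) : List Int × List Int × List Int × List Int × List Int × List Int :=
  let columns := (PySem.Dict.mk options).getD "columns" []
  (PySem.List.enumerate columns).foldl pvStepA ([], [], [], [], [], [])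

-- ===== PORT B =====
-- Source B's 'monetary' comprehension: the monetary (index, expression_label) pairs
def pvMonetary (l : List (Int × List (String × String))) : List (Int × Option String) :=
  (l.filter (fun p => decide ((PySem.Dict.mk p.2).get? "figure_type" = some "monetary"))).map
    (fun p => (p.1, (PySem.Dict.mk p.2).get? "expression_label"))

-- Source B's six independent filters over 'monetary'
def pvSelect (m : List (Int × Option String)) :
    List Int × List Int × List Int × List Int × List Int × List Int :=
  ( m.map (·.1),
    (m.filter (fun q => decide (q.2 = some "balance"))).map (·.1),
    (m.filter (fun q => decide (q.2 = some "foreign_balance"))).map (·.1),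
    (m.filter (fun q => decide (¬ q.2 = some "amount_currency" ∧ ¬ q.2 = some "foreign_balance"))).map (·.1),
    (m.filter (fun q => decide (¬ q.2 = some "amount_currency" ∧ q.2 = some "foreign_balance"))).map (·.1),
    (m.filter (fun q => decide (q.2 = some "amount_currency"))).map (·.1) )

def identify_currency_indices_py_alt (options : List (String × List (List (String × String)))) : List Int × List Int × List Int × List Int × List Int × List Int :=
  let columns := (PySem.Dict.mk options).getD "columns" []
  pvSelect (pvMonetary (PySem.List.enumerate columns))

-- ===== PRECONDITION & SPEC =====
-- A raises KeyError when the options dict has no "columns" key; Pre_ requires it.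
def Pre_identify_currency_indices_py (options : List (String × List (List (String × String)))) : Prop :=
  ¬ (PySem.Dict.mk options).get? "columns" = none
instance (options : List (String × List (List (String × String)))) : Decidable (Pre_identify_currency_indices_py options) := by unfold Pre_identify_currency_indices_py; infer_instance

def pvWitness_identify_currency_indices_py : (List (String × List (List (String × String)))) :=
  [("columns", [[("figure_type", "monetary"), ("expression_label", "balance")]])]

def Spec_identify_currency_indices_py (options : List (String × List (List (String × String)))) (out : List Int × List Int × List Int × List Int × List Int × List Int) : Prop := out = identify_currency_indices_py_alt options
instance (options : List (String × List (List (String × String)))) (out : List Int × List Int × List Int × List Int × List Int × List Int) : Decidable (Spec_identify_currency_indices_py options out) := by unfold Spec_identify_currency_indices_py; infer_instance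

-- ===== CLAIM (what is proved, stated in full; the proofs are below) =====
def Claim_equal_identify_currency_indices_py : Prop := ∀ (options : List (String × List (List (String × String)))), Dom_identify_currency_indices_py options → Pre_identify_currency_indices_py options → Spec_identify_currency_indices_py options (identify_currency_indices_py options)

-- ===== LEMMAS AND PROOFS =====
lemma pv_fold_spec (l : List (Int × List (String × String)))
    (a b c d e f : List Int) :
    l.foldl pvStepA (a, b, c, d, e, f) =
      (a ++ (pvSelect (pvMonetary l)).1,
       b ++ (pvSelect (pvMonetary l)).2.1,
       c ++ (pvSelect (pvMonetary l)).2.2.1,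
       d ++ (pvSelect (pvMonetary l)).2.2.2.1,
       e ++ (pvSelect (pvMonetary l)).2.2.2.2.1,
       f ++ (pvSelect (pvMonetary l)).2.2.2.2.2) := by
  induction l generalizing a b c d e f with
  | nil => simp [pvSelect, pvMonetary]
  | cons p t ih =>
    by_cases h1 : (PySem.Dict.mk p.2).get? "figure_type" = some "monetary"
    · by_cases h2 : (PySem.Dict.mk p.2).get? "expression_label" = some "balance" <;>
      by_cases h3 : (PySem.Dict.mk p.2).get? "expression_label" = some "foreign_balance" <;>
      by_cases h4 : (PySem.Dict.mk p.2).get? "expression_label" = some "amount_currency" <;>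
      simp_all [pvStepA, pvSelect, pvMonetary]
    · simp_all [pvStepA, pvSelect, pvMonetary]

-- ===== VERDICT (by name: the statement is the Claim_ definition above) =====
theorem identify_currency_indices_py_spec : Claim_equal_identify_currency_indices_py := by
  intro options _ _
  show identify_currency_indices_py options = identify_currency_indices_py_alt options
  simp [identify_currency_indices_py, identify_currency_indices_py_alt, pv_fold_spec]
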